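-- pv_equiv track=rewrite | github.com/Erazonics/genai-stack | utils.py | extract_title_and_question
-- ===== SOURCE A (Python) =====
-- def extract_title_and_question(input_string):
--     lines = input_string.strip().split("\n")
--
--     title = ""
--     question = ""
--     is_question = False  # flag to know if we are inside a "Question" block
--
--     for line in lines:
--         if line.startswith("Title:"):
--             title = line.split("Title: ", 1)[1].strip()
--         elif line.startswith("Question:"):
--             question = line.split("Question: ", 1)[1].strip()
--             is_question = (
--                 True  # set the flag to True once we encounter a "Question:" line
--             )
--         elif is_question:
--             # if the line does not start with "Question:" but we are inside a "Question" block,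
--             # then it is a continuation of the question
--             question += "\n" + line.strip()
--
--     return title, question
-- ===== SOURCE B (Python) =====
-- def extract_title_and_question(input_string):
--     lines = input_string.strip().split("\n")
--
--     title = ""
--     q_idx = None
--     for i, line in enumerate(lines):
--         if line.startswith("Title:"):
--             title = line.split("Title: ", 1)[1].strip()
--         elif line.startswith("Question:"):
--             q_idx = i  # remember only the LAST question line
--
--     question = ""
--     if q_idx is not None:
--         question = lines[q_idx].split("Question: ", 1)[1].strip()
--         for line in lines[q_idx + 1:]:
--             if not line.startswith("Title:") and not line.startswith("Question:"):
--                 question += "\n" + line.strip()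
--
--     return title, question
-- ===== Notes on version B (the rewrite author's own statement) =====
-- stated objective: alternative
-- what changed: A's single loop with an is_question flag and incremental overwriting is replaced by a two-phase decomposition: one scan records the last 'Title:' content and the index of the last 'Question:' line, then a second loop over only the lines after that index assembles the question and its continuation lines.
-- outside the precondition, e.g. on extract_title_and_question('Title:'): A raises IndexError, B raises IndexError; on extract_title_and_question('Title: '): A raises IndexError, B raises IndexError; on extract_title_and_question('Question:'): A raises IndexError, B raises IndexError
import Mathlib
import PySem

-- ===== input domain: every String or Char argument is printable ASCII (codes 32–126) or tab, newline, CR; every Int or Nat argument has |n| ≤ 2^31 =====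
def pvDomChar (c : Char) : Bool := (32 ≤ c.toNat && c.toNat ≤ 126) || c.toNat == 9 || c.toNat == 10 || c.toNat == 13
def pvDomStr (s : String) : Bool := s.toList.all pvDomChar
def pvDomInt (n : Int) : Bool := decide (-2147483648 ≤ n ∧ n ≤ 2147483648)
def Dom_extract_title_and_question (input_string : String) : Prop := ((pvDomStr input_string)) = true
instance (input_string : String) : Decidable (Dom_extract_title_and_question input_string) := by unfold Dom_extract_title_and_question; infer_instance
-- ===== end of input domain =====

-- B replaces A's single stateful flag-loop by a two-phase decomposition: one scan that records
-- the index of the LAST "Question:" line (and the last title), then a second loop over only the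
-- lines after it to collect the question's continuation lines. Objective: alternative decomposition.

-- ===== PORT A =====

-- line.split(sep, 1)[1].strip()  (shared by both Pythons; [1] defaults to "" — unreached inside Pre_)
def pvPartAfter (sep line : String) : String :=
  PySem.Str.strip (PySem.List.pyGetD ((PySem.Str.splitMax? line sep 1).getD []) 1 "")

-- one iteration of A's loop over state (title, question, is_question)
def pvStepA (s : String × String × Bool) (line : String) : String × String × Bool :=
  if PySem.Str.startswith line "Title:" then (pvPartAfter "Title: " line, s.2.1, s.2.2)
  else if PySem.Str.startswith line "Question:" then (s.1, pvPartAfter "Question: " line, true)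
  else if s.2.2 then (s.1, s.2.1 ++ "\n" ++ PySem.Str.strip line, s.2.2)
  else s

def extract_title_and_question (input_string : String) : String × String :=
  let lines := (PySem.Str.split? (PySem.Str.strip input_string) "\n").getD []
  let st := lines.foldl pvStepA ("", "", false)
  (st.1, st.2.1)

-- ===== PORT B =====

-- one iteration of B's first loop over state (title, q_idx), fed by enumerate
def pvStepB (s : String × Option Int) (p : Int × String) : String × Option Int :=
  if PySem.Str.startswith p.2 "Title:" then (pvPartAfter "Title: " p.2, s.2)
  else if PySem.Str.startswith p.2 "Question:" then (s.1, some p.1)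
  else s

-- B's second phase: the question from the last "Question:" line and its continuations
def pvQuestionB : List String → Option Int → String
  | _, none => ""
  | lines, some i =>
    (PySem.List.slice lines (some (i + 1)) none).foldl
      (fun q line =>
        if !PySem.Str.startswith line "Title:" && !PySem.Str.startswith line "Question:" then
          q ++ "\n" ++ PySem.Str.strip line
        else q)
      (pvPartAfter "Question: " (PySem.List.pyGetD lines i ""))

def extract_title_and_question_alt (input_string : String) : String × String :=
  let lines := (PySem.Str.split? (PySem.Str.strip input_string) "\n").getD []
  let fs := (PySem.List.enumerate lines 0).foldl pvStepB ("", none)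
  (fs.1, pvQuestionB lines fs.2)

-- ===== PRECONDITION & SPEC =====
-- Pre_ excludes exactly the inputs on which Python A raises IndexError: a line that starts with
-- "Title:" (resp. "Question:") but does not contain "Title: " (resp. "Question: "), so that
-- line.split(sep, 1) has no element [1].
def Pre_extract_title_and_question (input_string : String) : Prop :=
  ∀ line ∈ (PySem.Str.split? (PySem.Str.strip input_string) "\n").getD [],
    (PySem.Str.startswith line "Title:" = true → PySem.Str.isIn "Title: " line = true) ∧
    (PySem.Str.startswith line "Question:" = true → PySem.Str.isIn "Question: " line = true)
instance (input_string : String) : Decidable (Pre_extract_title_and_question input_string) := by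
  unfold Pre_extract_title_and_question; infer_instance

def pvWitness_extract_title_and_question : String :=
  "Title: Greetings\nQuestion: how are\nyou today?\nTitle: Late\nmore"

def Spec_extract_title_and_question (input_string : String) (out : String × String) : Prop := out = extract_title_and_question_alt input_string
instance (input_string : String) (out : String × String) : Decidable (Spec_extract_title_and_question input_string out) := by unfold Spec_extract_title_and_question; infer_instance

-- ===== CLAIM (what is proved, stated in full; the proofs are below) =====
def Claim_equal_extract_title_and_question : Prop := ∀ (input_string : String), Dom_extract_title_and_question input_string → Pre_extract_title_and_question input_string → Spec_extract_title_and_question input_string (extract_title_and_question input_string)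

-- ===== LEMMAS AND PROOFS =====

-- appending one line to the tail of the text extends B's second-phase question in the obvious way
theorem pvQuestionB_append (lines : List String) (x : String) (i : Int)
    (h0 : 0 ≤ i) (h1 : i.toNat < lines.length) :
    pvQuestionB (lines ++ [x]) (some i) =
      (if !PySem.Str.startswith x "Title:" && !PySem.Str.startswith x "Question:" then
        pvQuestionB lines (some i) ++ "\n" ++ PySem.Str.strip x
      else pvQuestionB lines (some i)) := by
  have hi1 : (0:Int) ≤ i + 1 := by omega
  have hget : PySem.List.pyGetD (lines ++ [x]) i "" = PySem.List.pyGetD lines i "" := by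
    rw [PySem.List.pyGetD_eq_getElem _ _ h0 (by simp; omega),
        PySem.List.pyGetD_eq_getElem _ _ h0 (by omega)]
    exact List.getElem_append_left (by omega)
  have hdrop : (i + 1).toNat ≤ lines.length := by omega
  simp only [pvQuestionB]
  rw [PySem.List.slice_from _ hi1, PySem.List.slice_from _ hi1,
      List.drop_append_of_le_length hdrop, List.foldl_append, hget]
  rfl

-- appending a line whose index is lines.length starts a fresh question there
theorem pvQuestionB_append_last (lines : List String) (x : String) :
    pvQuestionB (lines ++ [x]) (some (lines.length : Int)) = pvPartAfter "Question: " x := by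
  have hi1 : (0:Int) ≤ (lines.length : Int) + 1 := by omega
  have hget : PySem.List.pyGetD (lines ++ [x]) (lines.length : Int) "" = x := by
    rw [PySem.List.pyGetD_eq_getElem _ _ (by omega) (by simp)]
    exact List.getElem_concat_length (by simp) (by simp)
  have hdrop : List.drop ((lines.length : Int) + 1).toNat (lines ++ [x]) = [] := by
    rw [List.drop_eq_nil_iff]; simp
  simp only [pvQuestionB, hget]
  rw [PySem.List.slice_from _ hi1, hdrop]
  rfl

-- the core invariant: A's fold state is B's two phases glued together
theorem pvMain (lines : List String) :
    lines.foldl pvStepA ("", "", false) =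
      (((PySem.List.enumerate lines 0).foldl pvStepB ("", none)).1,
       pvQuestionB lines ((PySem.List.enumerate lines 0).foldl pvStepB ("", none)).2,
       (((PySem.List.enumerate lines 0).foldl pvStepB ("", none)).2).isSome) ∧
    (∀ i, ((PySem.List.enumerate lines 0).foldl pvStepB ("", none)).2 = some i →
       0 ≤ i ∧ i.toNat < lines.length) := by
  induction lines using List.reverseRecOn with
  | nil =>
    refine ⟨by rfl, ?_⟩
    intro i h
    simp [PySem.List.enumerate_nil] at h
  | append_singleton ls x ih =>
    have hA : (ls ++ [x]).foldl pvStepA ("", "", false)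
        = pvStepA (ls.foldl pvStepA ("", "", false)) x := by
      rw [List.foldl_append]; rfl
    have hE : PySem.List.enumerate [x] ((0:Int) + ls.length) = [((ls.length : Int), x)] := by
      simp [PySem.List.enumerate_cons, PySem.List.enumerate_nil]
    have hB : (PySem.List.enumerate (ls ++ [x]) 0).foldl pvStepB ("", none)
        = pvStepB ((PySem.List.enumerate ls 0).foldl pvStepB ("", none)) (((ls.length : Int)), x) := by
      rw [PySem.List.enumerate_append, hE, List.foldl_append]; rfl
    set fs := (PySem.List.enumerate ls 0).foldl pvStepB ("", none) with hfs
    rw [hA, hB, ih.1]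
    cases hT : PySem.Str.startswith x "Title:" with
    | true =>
      constructor
      · simp only [pvStepA, pvStepB, hT, if_true]
        refine Prod.ext rfl (Prod.ext ?_ rfl)
        cases hidx : fs.2 with
        | none => rfl
        | some i =>
          obtain ⟨hi0, hi1⟩ := ih.2 i hidx
          rw [pvQuestionB_append ls x i hi0 hi1, hT]
          rfl
      · intro i h
        simp only [pvStepB, hT, if_true] at h
        obtain ⟨hi0, hi1⟩ := ih.2 i h
        refine ⟨hi0, by simp only [List.length_append, List.length_cons, List.length_nil]; omega⟩
    | false =>
      cases hQ : PySem.Str.startswith x "Question:" with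
      | true =>
        constructor
        · simp only [pvStepA, pvStepB, hT, hQ, if_true, if_false, Bool.false_eq_true]
          refine Prod.ext rfl (Prod.ext ?_ rfl)
          rw [pvQuestionB_append_last ls x]
        · intro i h
          simp only [pvStepB, hT, hQ, if_true, if_false, Bool.false_eq_true] at h
          have hi : i = (ls.length : Int) := by
            cases h; rfl
          subst hi
          refine ⟨by omega, by simp only [List.length_append, List.length_cons, List.length_nil]; omega⟩
      | false =>
        constructor
        · simp only [pvStepA, pvStepB, hT, hQ, if_false, Bool.false_eq_true]
          cases hidx : fs.2 with
          | none => simp [pvQuestionB]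
          | some i =>
            obtain ⟨hi0, hi1⟩ := ih.2 i hidx
            rw [pvQuestionB_append ls x i hi0 hi1, hT, hQ]
            rfl
        · intro i h
          simp only [pvStepB, hT, hQ, if_false, Bool.false_eq_true] at h
          obtain ⟨hi0, hi1⟩ := ih.2 i h
          refine ⟨hi0, by simp only [List.length_append, List.length_cons, List.length_nil]; omega⟩

-- ===== VERDICT (by name: the statement is the Claim_ definition above) =====
theorem extract_title_and_question_spec : Claim_equal_extract_title_and_question := by
  intro input_string _ _
  unfold Spec_extract_title_and_question extract_title_and_question extract_title_and_question_alt
  simp only []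
  rw [(pvMain _).1]
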